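-- pv_equiv track=rewrite | github.com/AlvieSpurlock/MathCore | MathCore/MathTypes/Advanced/Topology.py | IsT0
-- ===== SOURCE A (Python) =====
-- import itertools   # combinations, product
--
-- def _fs(s):
--     """Convert any iterable to frozenset."""
--     return frozenset(s)
--
-- def IsT0(points, open_sets):
--     pts = list(points)
--     for x, y in itertools.combinations(pts, 2):
--         separated = False
--         for U in open_sets:
--             U_fs = _fs(U)
--             if (x in U_fs) != (y in U_fs):                    # One in, one not
--                 separated = True; break
--         if not separated:
--             return False                                       # No separating open set → not T0
--     return True                                               # All pairs separated → T0
-- ===== SOURCE B (Python) =====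
-- def IsT0(points, open_sets):
--     """Membership-signature method: two points are T0-separated iff their
--     signatures of containing open sets differ, so the space is T0 iff all
--     signatures are distinct."""
--     sets = [frozenset(U) for U in open_sets]
--     seen = set()
--     for p in points:
--         sig = tuple(p in U for U in sets)
--         if sig in seen:
--             return False
--         seen.add(sig)
--     return True
-- ===== Notes on version B (the rewrite author's own statement) =====
-- stated objective: alternative
-- what changed: Replaced the all-pairs separation search by a single pass computing each point's membership signature over the open sets and detecting duplicate signatures with a hash set.
import Mathlib
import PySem

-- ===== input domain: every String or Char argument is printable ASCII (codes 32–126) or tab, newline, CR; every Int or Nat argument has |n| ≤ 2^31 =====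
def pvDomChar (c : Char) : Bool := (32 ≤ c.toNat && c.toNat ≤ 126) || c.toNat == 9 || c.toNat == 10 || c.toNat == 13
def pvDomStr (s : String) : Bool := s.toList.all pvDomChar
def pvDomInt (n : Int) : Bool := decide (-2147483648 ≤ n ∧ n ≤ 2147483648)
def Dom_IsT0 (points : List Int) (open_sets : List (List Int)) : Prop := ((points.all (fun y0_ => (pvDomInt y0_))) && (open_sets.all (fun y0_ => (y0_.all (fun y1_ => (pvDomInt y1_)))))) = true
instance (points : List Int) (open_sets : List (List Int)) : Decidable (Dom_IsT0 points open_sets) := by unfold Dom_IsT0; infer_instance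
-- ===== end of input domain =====

-- B replaces A's all-pairs separation search by one pass over the points that
-- builds each point's membership signature over the open sets and detects a
-- repeated signature with a set (objective: alternative; asymptotically fewer pair checks, not measurably faster on the timed inputs).

-- ===== PORT A =====
-- itertools.combinations(pts, 2): all pairs (x, y) with x strictly before y, in order
def pvCombs2 : List Int → List (Int × Int)
  | [] => []
  | x :: xs => xs.map (fun y => (x, y)) ++ pvCombs2 xs

-- inner 'for U in open_sets: … break' loop: is some U a separating open set for x, y?
-- (x in frozenset(U)) is exactly list membership U.contains x
def pvSepA (open_sets : List (List Int)) (x y : Int) : Bool :=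
  open_sets.any (fun U => (U.contains x) != (U.contains y))

-- outer loop with early 'return False' = all pairs pass
def IsT0 (points : List Int) (open_sets : List (List Int)) : Bool :=
  let pts := points
  (pvCombs2 pts).all (fun p => pvSepA open_sets p.1 p.2)

-- ===== PORT B =====
-- sig = tuple(p in U for U in sets)
def pvSig (open_sets : List (List Int)) (p : Int) : List Bool :=
  open_sets.map (fun U => U.contains p)

-- the 'for p in points' loop carrying the 'seen' set of signatures
def pvAltLoop (open_sets : List (List Int)) (seen : PySem.Set (List Bool)) :
    List Int → Bool
  | [] => true
  | p :: rest =>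
    let sig := pvSig open_sets p
    if PySem.Set.contains seen sig then false
    else pvAltLoop open_sets (PySem.Set.add seen sig) rest

def IsT0_alt (points : List Int) (open_sets : List (List Int)) : Bool :=
  pvAltLoop open_sets PySem.Set.empty points

-- ===== PRECONDITION & SPEC =====
def Spec_IsT0 (points : List Int) (open_sets : List (List Int)) (out : Bool) : Prop := out = IsT0_alt points open_sets
instance (points : List Int) (open_sets : List (List Int)) (out : Bool) : Decidable (Spec_IsT0 points open_sets out) := by unfold Spec_IsT0; infer_instance

-- ===== CLAIM (what is proved, stated in full; the proofs are below) =====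
def Claim_equal_IsT0 : Prop := ∀ (points : List Int) (open_sets : List (List Int)), Dom_IsT0 points open_sets → Spec_IsT0 points open_sets (IsT0 points open_sets)

-- ===== LEMMAS AND PROOFS =====

-- a separating open set exists iff the two membership signatures differ
theorem pvSepA_eq (open_sets : List (List Int)) (x y : Int) :
    pvSepA open_sets x y = true ↔ pvSig open_sets x ≠ pvSig open_sets y := by
  simp only [pvSepA, pvSig, List.any_eq_true, bne_iff_ne, ne_eq]
  constructor
  · rintro ⟨U, hU, hne⟩ h
    exact hne (List.map_inj_left.mp h U hU)
  · intro h
    by_contra hc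
    push Not at hc
    exact h (List.map_inj_left.mpr hc)

-- A's all-pairs check is exactly: the signatures of the points are pairwise distinct
theorem pvA_iff (open_sets : List (List Int)) :
    ∀ pts : List Int,
      ((pvCombs2 pts).all (fun p => pvSepA open_sets p.1 p.2) = true ↔
        (pts.map (pvSig open_sets)).Nodup)
  | [] => by simp [pvCombs2]
  | x :: xs => by
    simp only [pvCombs2, List.all_append, List.all_map, Bool.and_eq_true, List.map_cons,
      List.nodup_cons, pvA_iff open_sets xs]
    constructor
    · rintro ⟨h1, h2⟩
      refine ⟨?_, h2⟩
      intro hmem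
      obtain ⟨y, hy, hxy⟩ := List.mem_map.mp hmem
      have := (pvSepA_eq open_sets x y).mp (by simpa using (List.all_eq_true.mp h1) y hy)
      exact this hxy.symm
    · rintro ⟨h1, h2⟩
      refine ⟨List.all_eq_true.mpr ?_, h2⟩
      intro y hy
      exact (pvSepA_eq open_sets x y).mpr
        (fun he => h1 (List.mem_map.mpr ⟨y, hy, he.symm⟩))

-- B's loop invariant: it returns true iff the remaining signatures are distinct
-- and none is already in 'seen'
theorem pvAltLoop_iff (open_sets : List (List Int)) :
    ∀ (pts : List Int) (seen : PySem.Set (List Bool)),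
      (pvAltLoop open_sets seen pts = true ↔
        (pts.map (pvSig open_sets)).Nodup ∧
          ∀ s ∈ pts.map (pvSig open_sets), s ∉ seen)
  | [], seen => by simp [pvAltLoop]
  | p :: rest, seen => by
    simp only [pvAltLoop]
    by_cases h : pvSig open_sets p ∈ seen
    · simp only [PySem.Set.contains_iff] at *
      rw [if_pos (by simpa using h)]
      simp only [List.map_cons, List.nodup_cons]
      constructor
      · intro hfalse; cases hfalse
      · rintro ⟨-, hall⟩
        exact absurd h (hall _ (List.mem_cons_self ..))
    · rw [if_neg (by simpa [PySem.Set.contains_iff] using h)]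
      rw [pvAltLoop_iff open_sets rest (PySem.Set.add seen (pvSig open_sets p))]
      simp only [List.map_cons, List.nodup_cons, List.mem_cons, PySem.Set.mem_add]
      constructor
      · rintro ⟨hnd, hall⟩
        refine ⟨⟨?_, hnd⟩, ?_⟩
        · intro hmem
          exact (hall _ hmem) (Or.inr rfl)
        · rintro s (rfl | hs)
          · exact h
          · intro hsseen
            exact (hall s hs) (Or.inl hsseen)
      · rintro ⟨⟨hnotmem, hnd⟩, hall⟩
        refine ⟨hnd, ?_⟩
        intro s hs
        rintro (hsseen | rfl)
        · exact (hall s (Or.inr hs)) hsseen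
        · exact hnotmem hs

-- ===== VERDICT (by name: the statement is the Claim_ definition above) =====
theorem IsT0_spec : Claim_equal_IsT0 := by
  intro points open_sets _
  unfold Spec_IsT0 IsT0 IsT0_alt
  rw [Bool.eq_iff_iff, pvA_iff, pvAltLoop_iff]
  simp [PySem.Set.empty]
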